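-- pv_equiv track=rewrite | github.com/robusta-dev/holmes-mcp-integrations | servers/aws/wrapper.py | extract_profile_from_command
-- ===== SOURCE A (Python) =====
-- def extract_profile_from_command(command: str) -> tuple[str, str]:
--     """Extract profile from AWS CLI command and return (command_without_profile, profile)."""
--     parts = command.split()
--     profile = None
--     filtered_parts = []
--
--     i = 0
--     while i < len(parts):
--         if parts[i] == '--profile' and i + 1 < len(parts):
--             profile = parts[i + 1]
--             i += 2  # Skip both --profile and the profile name
--         else:
--             filtered_parts.append(parts[i])
--             i += 1
--
--     return ' '.join(filtered_parts), profile
-- ===== SOURCE B (Python) =====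
-- def extract_profile_from_command(command: str) -> tuple[str, str]:
--     """Extract profile from AWS CLI command and return (command_without_profile, profile)."""
--     parts = command.split()
--     profile = None
--     while '--profile' in parts:
--         idx = parts.index('--profile')
--         if idx + 1 < len(parts):
--             profile = parts[idx + 1]
--             del parts[idx:idx + 2]
--         else:
--             break  # trailing --profile with no value stays in place
--     return ' '.join(parts), profile
-- ===== Notes on version B (the rewrite author's own statement) =====
-- stated objective: alternative
-- what changed: Replaces A's single index-based scan that builds a filtered list with a repeated find-first-and-delete loop ('--profile' in parts / parts.index / del slice) that mutates the token list in place until no complete --profile pair remains.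
import Mathlib
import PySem

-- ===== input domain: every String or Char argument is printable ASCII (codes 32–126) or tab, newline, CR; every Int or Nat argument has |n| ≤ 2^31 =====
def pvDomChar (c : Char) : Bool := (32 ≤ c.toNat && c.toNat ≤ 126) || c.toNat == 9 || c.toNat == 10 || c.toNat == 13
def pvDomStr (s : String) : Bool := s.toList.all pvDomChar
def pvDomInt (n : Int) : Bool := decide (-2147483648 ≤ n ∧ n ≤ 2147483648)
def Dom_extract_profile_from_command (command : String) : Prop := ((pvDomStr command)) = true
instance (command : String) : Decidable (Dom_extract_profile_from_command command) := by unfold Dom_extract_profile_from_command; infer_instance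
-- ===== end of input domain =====

-- B replaces A's single index-based filtering scan with a repeated find-first-'--profile'-and-delete-pair loop (alternative decomposition, same return value).

-- ===== PORT A =====
-- A's while loop over index i: condition 'parts[i] == "--profile" and i+1 < len(parts)'
-- becomes a match on the remaining suffix (two-element lookahead).
def pvALoop (parts : List String) (profile : Option String) (filtered : List String) :
    List String × Option String :=
  match parts with
  | [] => (filtered, profile)
  | [p] => (filtered ++ [p], profile)          -- i+1 < len fails: append parts[i]
  | p :: q :: rest =>
    if p = "--profile" then pvALoop rest (some q) filtered      -- profile = parts[i+1]; i += 2
    else pvALoop (q :: rest) profile (filtered ++ [p])          -- append; i += 1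

def extract_profile_from_command (command : String) : String × Option String :=
  let parts := PySem.Str.split₀ command
  let r := pvALoop parts none []
  (PySem.Str.join " " r.1, r.2)

-- ===== PORT B =====
-- Source B's 'while "--profile" in parts: idx = parts.index(...)': the membership test and
-- parts.index are ported together as a match on PySem.List.index? (some ↔ membership).
-- 'del parts[idx:idx+2]' is List.take idx ++ List.drop (idx+2) (exact for 0 ≤ idx).
def pvBLoop (parts : List String) (profile : Option String) : List String × Option String :=
  match PySem.List.index? parts "--profile" with
  | none => (parts, profile)                                   -- '--profile' not in parts: loop ends
  | some idx =>
    if hlt : idx + 1 < parts.length then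
      pvBLoop (parts.take idx ++ parts.drop (idx + 2)) (some parts[idx + 1])
    else (parts, profile)                                      -- break: trailing '--profile' kept
termination_by parts.length
decreasing_by simp [List.length_take, List.length_drop]; omega

def extract_profile_from_command_alt (command : String) : String × Option String :=
  let parts := PySem.Str.split₀ command
  let r := pvBLoop parts none
  (PySem.Str.join " " r.1, r.2)

-- ===== PRECONDITION & SPEC =====
def Spec_extract_profile_from_command (command : String) (out : String × Option String) : Prop := out = extract_profile_from_command_alt command
instance (command : String) (out : String × Option String) : Decidable (Spec_extract_profile_from_command command out) := by unfold Spec_extract_profile_from_command; infer_instance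

-- ===== CLAIM (what is proved, stated in full; the proofs are below) =====
def Claim_equal_extract_profile_from_command : Prop := ∀ (command : String), Dom_extract_profile_from_command command → Spec_extract_profile_from_command command (extract_profile_from_command command)

-- ===== LEMMAS AND PROOFS =====

-- A's loop walks over a flag-free prefix by appending its elements one by one.
theorem pvALoop_append_noflag (pre : List String) (xs : List String)
    (prof : Option String) (acc : List String) (h : "--profile" ∉ pre) :
    pvALoop (pre ++ xs) prof acc = pvALoop xs prof (acc ++ pre) := by
  induction pre generalizing acc with
  | nil => simp
  | cons a pre' ih =>
    have ha : a ≠ "--profile" := fun hc => h (hc ▸ List.mem_cons_self)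
    have h' : "--profile" ∉ pre' := fun hc => h (List.mem_cons_of_mem _ hc)
    cases hx : pre' ++ xs with
    | nil =>
      rcases List.append_eq_nil_iff.mp hx with ⟨h1, h2⟩
      subst h1; subst h2
      simp [pvALoop]
    | cons b rest =>
      have : pvALoop (a :: (pre' ++ xs)) prof acc
          = pvALoop (pre' ++ xs) prof (acc ++ [a]) := by
        rw [hx]; simp [pvALoop, ha]
      rw [List.cons_append, this, ih _ h']
      simp

-- index? locates the first occurrence: decompose the list around it.
theorem index?_decomp (parts : List String) (idx : Nat)
    (h : PySem.List.index? parts "--profile" = some idx) :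
    ∃ pre rest, parts = pre ++ "--profile" :: rest ∧ "--profile" ∉ pre ∧ pre.length = idx := by
  induction parts generalizing idx with
  | nil => simp [PySem.List.index?] at h
  | cons a l ih =>
    by_cases ha : a = "--profile"
    · subst ha
      rw [PySem.List.index?_cons_self] at h
      exact ⟨[], l, by simp, by simp, by simp [Option.some.inj h]⟩
    · rw [PySem.List.index?_cons_of_ne _ ha] at h
      rcases Option.map_eq_some_iff.mp h with ⟨j, hj, hji⟩
      rcases ih j hj with ⟨pre, rest, h1, h2, h3⟩
      exact ⟨a :: pre, rest, by simp [h1], by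
        intro hc; rcases List.mem_cons.mp hc with hc | hc
        · exact ha hc.symm
        · exact h2 hc, by simp [h3, ← hji]⟩

-- The two loops agree (B's repeated find-and-delete = A's one-pass filter).
theorem pvBLoop_eq_pvALoop (n : Nat) (parts : List String) (prof : Option String)
    (hn : parts.length ≤ n) :
    pvBLoop parts prof = pvALoop parts prof [] := by
  induction n generalizing parts prof with
  | zero =>
    have : parts = [] := List.eq_nil_of_length_eq_zero (Nat.le_zero.mp hn)
    subst this
    simp [pvBLoop, pvALoop, PySem.List.index?]
  | succ n ih =>
    cases hidx : PySem.List.index? parts "--profile" with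
    | none =>
      have hmem : "--profile" ∉ parts := by
        rw [← PySem.List.index?_eq_none_iff (xs := parts)]; exact hidx
      rw [pvBLoop, hidx]
      have := pvALoop_append_noflag parts [] prof [] hmem
      simp [pvALoop] at this
      simp [this]
    | some idx =>
      rcases index?_decomp parts idx hidx with ⟨pre, rest, hparts, hpre, hlen⟩
      subst hparts; subst hlen
      rw [pvBLoop, hidx]; dsimp only
      by_cases hlt : pre.length + 1 < (pre ++ "--profile" :: rest).length
      · -- a value follows the flag: rest = v :: rest'
        cases rest with
        | nil => simp at hlt
        | cons v rest' =>
          rw [dif_pos hlt]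
          have hget : (pre ++ "--profile" :: v :: rest')[pre.length + 1]'(by simp_all)
              = v := by
            rw [List.getElem_append_right (by omega)]
            simp
          have htake : (pre ++ "--profile" :: v :: rest').take pre.length = pre := by
            simp
          have hdrop : (pre ++ "--profile" :: v :: rest').drop (pre.length + 2) = rest' := by
            rw [List.drop_append]
            simp
          rw [hget, htake, hdrop]
          have hlen' : (pre ++ rest').length ≤ n := by
            simp at hn ⊢; omega
          rw [ih _ _ hlen']
          rw [pvALoop_append_noflag pre _ prof [] hpre,
              pvALoop_append_noflag pre _ (some v) [] hpre]
          simp [pvALoop]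
      · -- trailing '--profile': rest = []
        have hrest : rest = [] := by
          cases rest with
          | nil => rfl
          | cons v r => exfalso; apply hlt; simp
        subst hrest
        rw [dif_neg hlt, pvALoop_append_noflag pre _ prof [] hpre]
        simp [pvALoop]

-- ===== VERDICT (by name: the statement is the Claim_ definition above) =====
theorem extract_profile_from_command_spec : Claim_equal_extract_profile_from_command := by
  intro command _
  unfold Spec_extract_profile_from_command extract_profile_from_command
    extract_profile_from_command_alt
  exact congrArg (fun r => (PySem.Str.join " " r.1, r.2))
    (pvBLoop_eq_pvALoop (PySem.Str.split₀ command).length _ none le_rfl).symm
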